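-- pv_equiv track=rewrite | github.com/Selvomega/DIY_AST | src/text_processor.py | check_empty_line
-- ===== SOURCE A (Python) =====
-- def check_empty_line(input):
--     length = len(input)
--     for i in range(0,length):
--         if i == length-1:
--             if input[i] != "\n" and input[i] != " ":
--                 return False
--         else:
--             if input[i] != " ":
--                 return False
--     return True
-- ===== SOURCE B (Python) =====
-- def check_empty_line(input):
--     body = input[:-1] if input.endswith("\n") else input
--     return body == " " * len(body)
-- ===== Notes on version B (the rewrite author's own statement) =====
-- stated objective: simpler
-- what changed: Replaces the indexed loop with a per-position last-index branch by stripping one optional trailing newline up front and then comparing the remainder against a run of spaces in one uniform check.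
import Mathlib
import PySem

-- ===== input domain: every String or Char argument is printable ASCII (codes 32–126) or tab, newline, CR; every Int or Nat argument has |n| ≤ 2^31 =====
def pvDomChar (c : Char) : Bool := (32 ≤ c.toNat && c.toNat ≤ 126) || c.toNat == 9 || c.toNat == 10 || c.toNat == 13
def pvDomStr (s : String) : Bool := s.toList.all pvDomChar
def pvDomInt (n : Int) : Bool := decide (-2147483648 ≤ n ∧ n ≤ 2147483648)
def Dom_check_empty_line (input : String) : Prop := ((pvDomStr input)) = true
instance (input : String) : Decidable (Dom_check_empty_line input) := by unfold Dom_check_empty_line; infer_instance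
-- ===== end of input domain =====

-- B strips one optional trailing newline up front, then does one uniform all-spaces
-- comparison, instead of A's indexed loop with a special branch at the last index (simpler).

-- ===== PORT A =====
-- the 'for i in range(0, length)' loop with its early returns
def check_empty_line_loop (cs : List Char) (length : Int) : List Int → Bool
  | [] => true
  | i :: rest =>
    if i = length - 1 then
      if PySem.List.pyGetD cs i ' ' ≠ '\n' ∧ PySem.List.pyGetD cs i ' ' ≠ ' ' then false
      else check_empty_line_loop cs length rest
    else
      if PySem.List.pyGetD cs i ' ' ≠ ' ' then false
      else check_empty_line_loop cs length rest

def check_empty_line (input : String) : Bool :=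
  let length : Int := PySem.Str.len input
  check_empty_line_loop input.toList length (PySem.List.pyRange 0 length 1)

-- ===== PORT B =====
def check_empty_line_alt (input : String) : Bool :=
  let cs := input.toList
  let body := if PySem.Chars.endswith cs ['\n'] then PySem.List.slice cs none (some (-1)) else cs
  body == PySem.List.pyRepeat [' '] (body.length : Int)

-- ===== PRECONDITION & SPEC =====
def Spec_check_empty_line (input : String) (out : Bool) : Prop := out = check_empty_line_alt input
instance (input : String) (out : Bool) : Decidable (Spec_check_empty_line input out) := by unfold Spec_check_empty_line; infer_instance

-- ===== CLAIM (what is proved, stated in full; the proofs are below) =====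
def Claim_equal_check_empty_line : Prop := ∀ (input : String), Dom_check_empty_line input → Spec_check_empty_line input (check_empty_line input)

-- ===== LEMMAS AND PROOFS =====

-- A's loop over indices that are all ≠ length-1 factors into an 'all spaces' test
theorem loop_prefix (cs : List Char) (n : Int) (l r : List Int)
    (h : ∀ i ∈ l, i ≠ n - 1) :
    check_empty_line_loop cs n (l ++ r)
      = (l.all (fun i => PySem.List.pyGetD cs i ' ' == ' ') && check_empty_line_loop cs n r) := by
  induction l with
  | nil => simp
  | cons i l ih =>
    have hi : i ≠ n - 1 := h i (List.mem_cons_self ..)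
    simp only [List.cons_append, check_empty_line_loop, if_neg hi, List.all_cons]
    by_cases hs : PySem.List.pyGetD cs i ' ' = ' '
    · simp [hs, ih (fun j hj => h j (List.mem_cons_of_mem _ hj))]
    · simp [hs]

theorem loop_last (cs : List Char) (n i : Int) (h : i = n - 1) :
    check_empty_line_loop cs n [i]
      = ((PySem.List.pyGetD cs i ' ' == '\n') || (PySem.List.pyGetD cs i ' ' == ' ')) := by
  simp only [check_empty_line_loop, if_pos h]
  by_cases h1 : PySem.List.pyGetD cs i ' ' = '\n' <;>
    by_cases h2 : PySem.List.pyGetD cs i ' ' = ' ' <;> simp [h1, h2]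

theorem range_all_take (cs : List Char) (k : Nat) (hk : k ≤ cs.length) :
    (PySem.List.pyRange 0 (k : Int) 1).all (fun i => PySem.List.pyGetD cs i ' ' == ' ')
      = (cs.take k).all (· == ' ') := by
  induction k with
  | zero => simp
  | succ k ih =>
    have hk' : k ≤ cs.length := Nat.le_of_succ_le hk
    have hlt : k < cs.length := hk
    have hr : PySem.List.pyRange 0 ((k : Int) + 1) 1
        = PySem.List.pyRange 0 (k : Int) 1 ++ [(k : Int)] :=
      PySem.List.pyRange_one_succ_right (by exact_mod_cast Nat.zero_le k)
    rw [show ((k + 1 : Nat) : Int) = (k : Int) + 1 by push_cast; ring, hr]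
    rw [List.all_append, ih hk']
    have ht : cs.take (k + 1) = cs.take k ++ [cs[k]] := by
      rw [List.take_add_one, List.getElem?_eq_getElem hlt]; rfl
    rw [ht, List.all_append]
    simp [List.getD_eq_getElem?_getD, List.getElem?_eq_getElem hlt]

theorem singleton_suffix_concat (ds : List Char) (c x : Char) :
    [x] <:+ ds ++ [c] ↔ x = c := by
  constructor
  · rintro ⟨t, ht⟩
    have := congrArg List.getLast? ht
    simpa using this
  · rintro rfl
    exact ⟨ds, rfl⟩

theorem beq_replicate_all (l : List Char) :
    (l == List.replicate l.length ' ') = l.all (· == ' ') := by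
  rw [Bool.eq_iff_iff]
  simp only [beq_iff_eq, List.all_eq_true, beq_iff_eq, List.eq_replicate_iff]
  constructor
  · intro h x hx; exact h.2 x hx
  · intro hall; exact ⟨trivial, hall⟩

theorem check_empty_line_concat (ds : List Char) (c : Char) (input : String)
    (hcs : input.toList = ds ++ [c]) :
    check_empty_line input = check_empty_line_alt input := by
  have hlen : (PySem.Str.len input) = ((ds.length + 1 : Nat) : Int) := by
    simp [hcs]
  have hm : ds.length < (ds ++ [c]).length := by simp
  -- A side
  have hr : PySem.List.pyRange 0 ((ds.length + 1 : Nat) : Int) 1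
      = PySem.List.pyRange 0 (ds.length : Int) 1 ++ [(ds.length : Int)] := by
    rw [show ((ds.length + 1 : Nat) : Int) = (ds.length : Int) + 1 by push_cast; ring]
    exact PySem.List.pyRange_one_succ_right (by exact_mod_cast Nat.zero_le _)
  have hA : check_empty_line input
      = (ds.all (· == ' ') && ((c == '\n') || (c == ' '))) := by
    simp only [check_empty_line, hlen, hcs, hr]
    rw [loop_prefix _ _ _ _ (by
      intro i hi
      have := (PySem.List.mem_pyRange_one).mp hi
      omega)]
    rw [loop_last _ _ _ (by push_cast; ring)]
    have hget : PySem.List.pyGetD (ds ++ [c]) ((ds.length : Nat) : Int) ' ' = c := by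
      rw [PySem.List.pyGetD_natCast]
      simp [List.getD_eq_getElem?_getD]
    have htake := range_all_take (ds ++ [c]) ds.length (Nat.le_of_lt hm)
    rw [htake, hget, List.take_left]
  -- B side
  have hrep : ∀ (l : List Char),
      (l == PySem.List.pyRepeat [' '] ((l.length : Nat) : Int)) = l.all (· == ' ') := by
    intro l
    rw [PySem.List.pyRepeat_singleton]
    simpa using beq_replicate_all l
  rw [hA]
  by_cases hc : c = '\n'
  · subst hc
    have hend : PySem.Chars.endswith (ds ++ ['\n']) ['\n'] = true :=
      (PySem.Chars.endswith_iff _ _).mpr ((singleton_suffix_concat ds '\n' '\n').mpr rfl)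
    simp [check_empty_line_alt, hcs, hend, PySem.List.slice_to_neg_one]
    rw [beq_replicate_all]
  · have hend : PySem.Chars.endswith (ds ++ [c]) ['\n'] = false := by
      rw [← Bool.not_eq_true]
      intro hcon
      exact hc ((singleton_suffix_concat ds c '\n').mp ((PySem.Chars.endswith_iff _ _).mp hcon)).symm
    simp [check_empty_line_alt, hcs, hend]
    rw [show ds.length + 1 = (ds ++ [c]).length by simp, beq_replicate_all]
    rw [beq_eq_false_iff_ne.mpr hc]
    simp

-- ===== VERDICT (by name: the statement is the Claim_ definition above) =====
theorem check_empty_line_spec : Claim_equal_check_empty_line := by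
  intro input _
  unfold Spec_check_empty_line
  rcases List.eq_nil_or_concat input.toList with hnil | ⟨ds, c, hcs⟩
  · simp [check_empty_line, check_empty_line_alt, hnil,
      check_empty_line_loop, PySem.Chars.endswith]
  · exact check_empty_line_concat ds c input (by simpa using hcs)
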